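-- pv_equiv track=rewrite | github.com/pank-art/comp-graph-coursework | shape.py | _custom_shuffle
-- ===== SOURCE A (Python) =====
-- def _custom_shuffle(arr, a, b):
--     # Получаем подмассив элементов с индексами от a до b (включительно)
--     subarray = arr[a:b + 1]
--
--     # Разделяем подмассив на две половины
--     mid = (len(subarray) + 1) // 2  # Это будет середина массива
--     first_half = subarray[:mid]  # Первая половина
--     second_half = subarray[mid:]  # Вторая половина
--
--     # Чередуем элементы из первой и второй половины
--     shuffled_subarray = []
--     for i in range(len(first_half)):
--         shuffled_subarray.append(first_half[i])
--         if i < len(second_half):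
--             shuffled_subarray.append(second_half[i])
--
--     # Создаем новый массив с переставленными элементами
--     shuffled_arr = arr[:a] + shuffled_subarray + arr[b + 1:]
--
--     return shuffled_arr
-- ===== SOURCE B (Python) =====
-- def _custom_shuffle(arr, a, b):
--     sub = arr[a:b + 1]
--     n = len(sub)
--     mid = (n + 1) // 2
--     res = [None] * n
--     for i, x in enumerate(sub):
--         res[2 * i if i < mid else 2 * (i - mid) + 1] = x
--     return arr[:a] + res + arr[b + 1:]
-- ===== Notes on version B (the rewrite author's own statement) =====
-- stated objective: alternative
-- what changed: Replaces A's gather-style construction (split the subarray into two half slices and build the output left-to-right by appending from them alternately) with a scatter: preallocate the result and make one enumerate pass over the subarray, writing each source element into its computed target slot.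
import Mathlib
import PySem

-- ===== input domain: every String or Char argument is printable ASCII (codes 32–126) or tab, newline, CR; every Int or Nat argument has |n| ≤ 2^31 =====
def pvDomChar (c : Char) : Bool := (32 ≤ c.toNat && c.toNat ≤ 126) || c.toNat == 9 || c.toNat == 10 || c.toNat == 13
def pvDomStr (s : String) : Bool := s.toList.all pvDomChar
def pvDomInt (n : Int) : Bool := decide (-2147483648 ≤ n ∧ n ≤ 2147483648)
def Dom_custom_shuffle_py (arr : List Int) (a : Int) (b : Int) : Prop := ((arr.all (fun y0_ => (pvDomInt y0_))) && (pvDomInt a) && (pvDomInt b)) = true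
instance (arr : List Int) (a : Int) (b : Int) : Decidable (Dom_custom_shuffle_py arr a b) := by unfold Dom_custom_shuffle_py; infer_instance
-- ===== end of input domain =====

-- B replaces A's gather-style split-and-riffle (build output left to right by appending
-- from two half slices) by a scatter: one pass over the subarray writing each source
-- element into its computed target slot of a preallocated result (alternative decomposition, same cost).

-- ===== PORT A =====
def custom_shuffle_py (arr : List Int) (a : Int) (b : Int) : List Int :=
  let subarray := PySem.List.slice arr (some a) (some (b + 1))
  let mid := PySem.Int.floordiv ((subarray.length : Int) + 1) 2
  let first_half := PySem.List.slice subarray none (some mid)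
  let second_half := PySem.List.slice subarray (some mid) none
  let shuffled_subarray :=
    (PySem.List.pyRange 0 (first_half.length : Int) 1).foldl
      (fun acc i =>
        let acc1 := acc ++ [PySem.List.pyGetD first_half i 0]
        if i < (second_half.length : Int) then acc1 ++ [PySem.List.pyGetD second_half i 0] else acc1)
      []
  PySem.List.slice arr none (some a) ++ shuffled_subarray ++ PySem.List.slice arr (some (b + 1)) none

-- ===== PORT B =====
-- res = [None] * n is modelled as List.replicate n 0: every slot is assigned exactly once
-- by the loop (targets are a bijection onto range n), so the placeholder never survives.
-- res[t] = x is pySetD (exact: the target index is always in range here).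
def custom_shuffle_py_alt (arr : List Int) (a : Int) (b : Int) : List Int :=
  let sub := PySem.List.slice arr (some a) (some (b + 1))
  let n := (sub.length : Int)
  let mid := PySem.Int.floordiv (n + 1) 2
  let res := (PySem.List.enumerate sub).foldl
      (fun r p => PySem.List.pySetD r (if p.1 < mid then 2 * p.1 else 2 * (p.1 - mid) + 1) p.2)
      (List.replicate sub.length 0)
  PySem.List.slice arr none (some a) ++ res ++ PySem.List.slice arr (some (b + 1)) none

-- ===== PRECONDITION & SPEC =====
def Spec_custom_shuffle_py (arr : List Int) (a : Int) (b : Int) (out : List Int) : Prop := out = custom_shuffle_py_alt arr a b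
instance (arr : List Int) (a : Int) (b : Int) (out : List Int) : Decidable (Spec_custom_shuffle_py arr a b out) := by unfold Spec_custom_shuffle_py; infer_instance

-- ===== CLAIM (what is proved, stated in full; the proofs are below) =====
def Claim_equal_custom_shuffle_py : Prop := ∀ (arr : List Int) (a : Int) (b : Int), Dom_custom_shuffle_py arr a b → Spec_custom_shuffle_py arr a b (custom_shuffle_py arr a b)

-- ===== LEMMAS AND PROOFS =====

-- A-SIDE: interleaving halves f,s alternately equals reading positions by parity
lemma interleave_core (f s : List Int) (h1 : s.length ≤ f.length) (h2 : f.length ≤ s.length + 1) :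
    (List.range f.length).flatMap
        (fun i => f.getD i 0 :: if i < s.length then [s.getD i 0] else [])
      = (List.range (f.length + s.length)).map
        (fun k => if k % 2 = 0 then f.getD (k / 2) 0 else s.getD (k / 2) 0) := by
  induction s generalizing f with
  | nil =>
    match f, h2 with
    | [], _ => simp
    | [x], _ => simp [List.range_succ]
  | cons y s' ih =>
    match f, h1 with
    | x :: f', hh =>
      have h1' : s'.length ≤ f'.length := by simp at hh; omega
      have h2' : f'.length ≤ s'.length + 1 := by simp at h2; omega
      have key := ih f' h1' h2'
      have hlen : (x :: f').length + (y :: s').length = f'.length + s'.length + 1 + 1 := by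
        simp; omega
      rw [hlen, List.range_succ_eq_map, List.range_succ_eq_map,
        show (x :: f').length = f'.length + 1 from rfl, List.range_succ_eq_map]
      simp only [Nat.succ_eq_add_one, List.flatMap_cons, List.flatMap_map, List.map_cons,
        List.map_map]
      rw [show ((x :: f').getD 0 0 ::
            if 0 < (y :: s').length then [(y :: s').getD 0 0] else []) = [x, y] by simp]
      simp only [List.cons_append, List.nil_append]
      congr 1
      norm_num
      simp only [List.getD_eq_getElem?_getD] at key
      rw [key]
      apply List.map_congr_left
      intro k _hk
      simp only [Function.comp_apply, Nat.succ_eq_add_one]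
      have hmod : (k + 1 + 1) % 2 = k % 2 := by omega
      have hdiv : (k + 1 + 1) / 2 = k / 2 + 1 := by omega
      rw [hmod, hdiv]
      by_cases h : k % 2 = 0 <;> simp [h]

-- A's foldl body is an 'acc ++ g i' step
lemma loopA_flatMap (f s : List Int) :
    (List.range f.length).foldl
        (fun acc i =>
          let acc1 := acc ++ [f.getD i 0]
          if i < s.length then acc1 ++ [s.getD i 0] else acc1)
        []
      = (List.range f.length).flatMap
        (fun i => f.getD i 0 :: if i < s.length then [s.getD i 0] else []) := by
  rw [show (fun acc i =>
        let acc1 := acc ++ [f.getD i 0]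
        if i < s.length then acc1 ++ [s.getD i 0] else acc1)
      = (fun (acc : List Int) i =>
          acc ++ (f.getD i 0 :: if i < s.length then [s.getD i 0] else [])) from ?_]
  · exact PySem.List.foldl_append_eq_flatMap _ _ _
  · funext acc i
    by_cases h : i < s.length <;> simp [h]

-- A's inner loop equals gathering each output position from its source index
lemma shuffle_inner_eq (sub : List Int) :
    List.foldl
        (fun acc i =>
          if i < ((PySem.List.slice sub (some (PySem.Int.floordiv ((sub.length : Int) + 1) 2)) none).length : Int) then
            acc ++ [PySem.List.pyGetD (PySem.List.slice sub none (some (PySem.Int.floordiv ((sub.length : Int) + 1) 2))) i 0] ++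
              [PySem.List.pyGetD (PySem.List.slice sub (some (PySem.Int.floordiv ((sub.length : Int) + 1) 2)) none) i 0]
          else acc ++ [PySem.List.pyGetD (PySem.List.slice sub none (some (PySem.Int.floordiv ((sub.length : Int) + 1) 2))) i 0])
        [] (PySem.List.pyRange 0 ((PySem.List.slice sub none (some (PySem.Int.floordiv ((sub.length : Int) + 1) 2))).length : Int))
      = List.map
        (fun k =>
          if PySem.Int.mod k 2 = 0 then PySem.List.pyGetD sub (PySem.Int.floordiv k 2) 0
          else PySem.List.pyGetD sub (PySem.Int.floordiv ((sub.length : Int) + 1) 2 + PySem.Int.floordiv k 2) 0)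
        (PySem.List.pyRange 0 (sub.length : Int)) := by
  have hmid : PySem.Int.floordiv ((sub.length : Int) + 1) 2 = (((sub.length + 1) / 2 : Nat) : Int) := by
    rw [PySem.Int.floordiv_eq_ediv_of_pos (by norm_num)]
    push_cast
    rfl
  rw [hmid, PySem.List.slice_to_natCast, PySem.List.slice_from_natCast,
    PySem.List.pyRange_zero_natCast, PySem.List.pyRange_zero_natCast,
    List.foldl_map, List.map_map]
  rw [show (fun (acc : List Int) (i : Nat) =>
        if ((i : Int)) < ((List.drop ((sub.length + 1) / 2) sub).length : Int) then
          acc ++ [PySem.List.pyGetD (List.take ((sub.length + 1) / 2) sub) (i : Int) 0] ++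
            [PySem.List.pyGetD (List.drop ((sub.length + 1) / 2) sub) (i : Int) 0]
        else acc ++ [PySem.List.pyGetD (List.take ((sub.length + 1) / 2) sub) (i : Int) 0])
      = (fun acc i =>
          let acc1 := acc ++ [(List.take ((sub.length + 1) / 2) sub).getD i 0]
          if i < (List.drop ((sub.length + 1) / 2) sub).length then
            acc1 ++ [(List.drop ((sub.length + 1) / 2) sub).getD i 0] else acc1) by
    funext acc i
    simp [PySem.List.pyGetD_natCast]]
  rw [loopA_flatMap]
  rw [interleave_core _ _ (by simp; omega) (by simp; omega)]
  rw [show (List.take ((sub.length + 1) / 2) sub).length + (List.drop ((sub.length + 1) / 2) sub).length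
      = sub.length by simp; omega]
  apply List.map_congr_left
  intro k hk
  rw [List.mem_range] at hk
  have hmod2 : PySem.Int.mod (k : Int) 2 = ((k % 2 : Nat) : Int) := by
    rw [PySem.Int.mod_eq_emod_of_pos (by norm_num)]
    push_cast
    rfl
  have hdiv2 : PySem.Int.floordiv (k : Int) 2 = ((k / 2 : Nat) : Int) := by
    rw [PySem.Int.floordiv_eq_ediv_of_pos (by norm_num)]
    push_cast
    rfl
  simp only [hmod2, hdiv2, Function.comp_apply]
  rw [show (((sub.length + 1) / 2 : Nat) : Int) + ((k / 2 : Nat) : Int)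
      = (((sub.length + 1) / 2 + k / 2 : Nat) : Int) by push_cast; ring]
  simp only [PySem.List.pyGetD_natCast, Nat.cast_eq_zero]
  by_cases h : k % 2 = 0
  · have hlt : k / 2 < (sub.length + 1) / 2 := by omega
    simp [h, List.getD_eq_getElem?_getD, hlt]
  · simp [h, List.getD_eq_getElem?_getD, List.getElem?_drop]

-- B-SIDE: generic scatter lemmas about foldl of List.set
lemma scatter_length (pairs : List (Nat × Int)) (init : List Int) :
    (pairs.foldl (fun r p => r.set p.1 p.2) init).length = init.length := by
  induction pairs generalizing init with
  | nil => rfl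
  | cons q ps ih => simp [List.foldl_cons, ih]

lemma scatter_unwritten (pairs : List (Nat × Int)) (init : List Int) (k : Nat)
    (h : ∀ p ∈ pairs, p.1 ≠ k) :
    (pairs.foldl (fun r p => r.set p.1 p.2) init)[k]? = init[k]? := by
  induction pairs generalizing init with
  | nil => rfl
  | cons q ps ih =>
    simp only [List.foldl_cons]
    rw [ih _ (fun p hp => h p (List.mem_cons_of_mem _ hp))]
    exact List.getElem?_set_ne (h q (List.mem_cons_self ..))

lemma scatter_written (pairs : List (Nat × Int)) (init : List Int) (q : Nat × Int)
    (hmem : q ∈ pairs) (hdist : pairs.Pairwise (fun p r => p.1 ≠ r.1))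
    (hlt : q.1 < init.length) :
    (pairs.foldl (fun r p => r.set p.1 p.2) init)[q.1]? = some q.2 := by
  induction pairs generalizing init with
  | nil => cases hmem
  | cons p ps ih =>
    simp only [List.foldl_cons]
    rcases List.mem_cons.mp hmem with h | h
    · subst h
      rw [scatter_unwritten _ _ _ (fun r hr => Ne.symm ((List.pairwise_cons.mp hdist).1 r hr))]
      simp [List.getElem?_set_self', List.getElem?_eq_getElem hlt]
    · exact ih (init.set p.1 p.2) h (List.pairwise_cons.mp hdist).2 (by simpa using hlt)

lemma scatter_eq_gather (sub : List Int) :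
    (PySem.List.enumerate sub).foldl
        (fun r p => PySem.List.pySetD r
          (if p.1 < PySem.Int.floordiv ((sub.length : Int) + 1) 2 then 2 * p.1
           else 2 * (p.1 - PySem.Int.floordiv ((sub.length : Int) + 1) 2) + 1) p.2)
        (List.replicate sub.length 0)
      = List.map
        (fun k =>
          if PySem.Int.mod k 2 = 0 then PySem.List.pyGetD sub (PySem.Int.floordiv k 2) 0
          else PySem.List.pyGetD sub (PySem.Int.floordiv ((sub.length : Int) + 1) 2 + PySem.Int.floordiv k 2) 0)
        (PySem.List.pyRange 0 (sub.length : Int)) := by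
  have hmid : PySem.Int.floordiv ((sub.length : Int) + 1) 2 = (((sub.length + 1) / 2 : Nat) : Int) := by
    rw [PySem.Int.floordiv_eq_ediv_of_pos (by norm_num)]
    push_cast
    rfl
  rw [hmid, PySem.List.enumerate_eq_map_pyRange (d := 0)]
  simp only [PySem.List.len]
  rw [PySem.List.pyRange_zero_natCast, List.map_map,
    List.foldl_map, List.map_map]
  simp only [Function.comp_apply]
  rw [show (fun (x : List Int) (y : Nat) =>
        PySem.List.pySetD x
          (if ((y : Int)) < (((sub.length + 1) / 2 : Nat) : Int) then 2 * (y : Int)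
           else 2 * ((y : Int) - (((sub.length + 1) / 2 : Nat) : Int)) + 1)
          (PySem.List.pyGetD sub (y : Int) 0))
      = (fun (r : List Int) (j : Nat) =>
          r.set (if j < (sub.length + 1) / 2 then 2 * j else 2 * (j - (sub.length + 1) / 2) + 1)
            (sub.getD j 0)) from ?_]
  swap
  · funext r j
    simp only [PySem.List.pyGetD_natCast]
    by_cases h : j < (sub.length + 1) / 2
    · have h' : (j : Int) < (((sub.length + 1) / 2 : Nat) : Int) := by exact_mod_cast h
      rw [if_pos h', PySem.List.pySetD_of_nonneg r _ (by positivity), if_pos h]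
      congr 1
    · have h' : ¬ (j : Int) < (((sub.length + 1) / 2 : Nat) : Int) := by exact_mod_cast h
      rw [if_neg h', PySem.List.pySetD_of_nonneg r _ (by omega), if_neg h]
      congr 1
      omega
  rw [← List.foldl_map
      (f := fun j : Nat =>
        ((if j < (sub.length + 1) / 2 then 2 * j else 2 * (j - (sub.length + 1) / 2) + 1),
          sub.getD j 0))
      (g := fun (r : List Int) (p : Nat × Int) => r.set p.1 p.2)]
  apply List.ext_getElem?
  intro k
  by_cases hk : k < sub.length
  · have hsrc : ∃ j : Nat, j < sub.length ∧
        (if j < (sub.length + 1) / 2 then 2 * j else 2 * (j - (sub.length + 1) / 2) + 1) = k := by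
      by_cases he : k % 2 = 0
      · exact ⟨k / 2, by omega, by rw [if_pos (by omega)]; omega⟩
      · exact ⟨(sub.length + 1) / 2 + k / 2, by omega, by rw [if_neg (by omega)]; omega⟩
    obtain ⟨j, hjm, hjk⟩ := hsrc
    have hwrit := scatter_written
      ((List.range sub.length).map (fun j : Nat =>
        ((if j < (sub.length + 1) / 2 then 2 * j else 2 * (j - (sub.length + 1) / 2) + 1),
          sub.getD j 0)))
      (List.replicate sub.length 0) (k, sub.getD j 0)
      (by
        rw [List.mem_map]
        exact ⟨j, List.mem_range.mpr hjm, by rw [hjk]⟩)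
      (by
        rw [List.pairwise_map]
        refine List.Pairwise.imp ?_ (List.pairwise_lt_range)
        intro x y hxy
        simp only
        split_ifs <;> omega)
      (by simpa using hk)
    simp only at hwrit
    rw [hwrit, List.getElem?_map, List.getElem?_range hk]
    have hmod2 : PySem.Int.mod (k : Int) 2 = ((k % 2 : Nat) : Int) := by
      rw [PySem.Int.mod_eq_emod_of_pos (by norm_num)]
      push_cast
      rfl
    have hdiv2 : PySem.Int.floordiv (k : Int) 2 = ((k / 2 : Nat) : Int) := by
      rw [PySem.Int.floordiv_eq_ediv_of_pos (by norm_num)]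
      push_cast
      rfl
    simp only [Option.map_some, Function.comp_apply, hmod2, hdiv2]
    congr 1
    by_cases he : k % 2 = 0
    · rw [if_pos (by exact_mod_cast congrArg (Nat.cast (R := Int)) he), PySem.List.pyGetD_natCast]
      have hj : j = k / 2 := by
        by_cases hq : j < (sub.length + 1) / 2 <;> simp only [hq, if_true, if_false] at hjk <;> omega
      subst hj
      rfl
    · rw [if_neg (by
        intro hcontra
        exact he (by exact_mod_cast hcontra))]
      rw [show ((((sub.length + 1) / 2 : Nat) : Int) + ((k / 2 : Nat) : Int))
          = (((sub.length + 1) / 2 + k / 2 : Nat) : Int) by push_cast; ring,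
        PySem.List.pyGetD_natCast]
      have hj : j = (sub.length + 1) / 2 + k / 2 := by
        by_cases hq : j < (sub.length + 1) / 2 <;> simp only [hq, if_true, if_false] at hjk <;> omega
      subst hj
      rfl
  · rw [List.getElem?_eq_none (l := _), List.getElem?_eq_none]
    · simp only [List.length_map, List.length_range]
      omega
    · rw [scatter_length]
      simp only [List.length_replicate]
      omega

-- ===== VERDICT (by name: the statement is the Claim_ definition above) =====
theorem custom_shuffle_py_spec : Claim_equal_custom_shuffle_py := by
  intro arr a b _
  show custom_shuffle_py arr a b = custom_shuffle_py_alt arr a b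
  unfold custom_shuffle_py custom_shuffle_py_alt
  dsimp only
  congr 1
  congr 1
  generalize PySem.List.slice arr (some a) (some (b + 1)) = sub
  rw [shuffle_inner_eq sub, scatter_eq_gather sub]
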